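-- pv_equiv track=rewrite | github.com/Sunnywslau/checkTAF | taf_functions.py | parse_taf_data
-- ===== SOURCE A (Python) =====
-- def parse_taf_data(taf_lines):
--     """Parse TAF data lines into a dictionary"""
--     taf_dict = {}
--     current_airport = None
--     current_taf = []
--
--     for line in taf_lines:
--         if line.startswith("TAF") or line.startswith("TAF AMD") or line.startswith("TAF COR"):
--             if current_airport and current_taf:
--                 taf_dict[current_airport] = '\n'.join(current_taf)
--
--             parts = line.split()
--             if line.startswith("TAF AMD") or line.startswith("TAF COR"):
--                 current_airport = parts[2]
--             else:
--                 current_airport = parts[1]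
--
--             current_taf = [line]
--         elif current_airport:
--             current_taf.append(line.strip())
--
--     if current_airport and current_taf:
--         taf_dict[current_airport] = '\n'.join(current_taf)
--
--     return taf_dict
-- ===== SOURCE B (Python) =====
-- def parse_taf_data(taf_lines):
--     """Parse TAF data lines into a dictionary (block-splitting re-implementation)"""
--     taf_dict = {}
--     lines = taf_lines
--     # drop anything before the first header line
--     while lines and not lines[0].startswith("TAF"):
--         lines = lines[1:]
--     # repeatedly peel off one header + its body block
--     while lines:
--         header = lines[0]
--         rest = lines[1:]
--         body = []
--         while rest and not rest[0].startswith("TAF"):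
--             body.append(rest[0].strip())
--             rest = rest[1:]
--         parts = header.split()
--         key = parts[2] if header.startswith(("TAF AMD", "TAF COR")) else parts[1]
--         taf_dict[key] = '\n'.join([header] + body)
--         lines = rest
--     return taf_dict
-- ===== Notes on version B (the rewrite author's own statement) =====
-- stated objective: alternative
-- what changed: A is a single-pass state machine carrying (current_airport, current_taf) and flushing into the dict at each header and after the loop; B instead drops the pre-header junk prefix and then repeatedly peels off one header plus its body block (stripping body lines as the block is cut), inserting each finished block directly.
import Mathlib
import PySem

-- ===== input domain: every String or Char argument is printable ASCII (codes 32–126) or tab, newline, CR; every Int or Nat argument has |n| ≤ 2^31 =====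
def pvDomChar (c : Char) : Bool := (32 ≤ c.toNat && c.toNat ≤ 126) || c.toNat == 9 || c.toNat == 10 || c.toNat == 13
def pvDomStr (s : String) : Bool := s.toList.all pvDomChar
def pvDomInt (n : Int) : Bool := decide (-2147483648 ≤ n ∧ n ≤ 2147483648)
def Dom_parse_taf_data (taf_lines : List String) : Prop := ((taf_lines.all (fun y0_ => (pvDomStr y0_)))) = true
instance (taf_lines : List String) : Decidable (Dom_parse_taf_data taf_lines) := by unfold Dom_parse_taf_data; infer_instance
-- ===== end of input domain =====

-- B replaces A's running state machine (pending airport + accumulating list) by a block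
-- decomposition: drop the junk prefix, then repeatedly peel one header plus its body. Objective: alternative.

-- ===== PORT A =====
-- finalisation that Python A performs both inside the loop and after it:
-- 'if current_airport and current_taf: taf_dict[current_airport] = "\n".join(current_taf)'.
-- Python truthiness of current_airport: on Pre_ a set airport is a nonempty split() token,
-- so 'some _' is exactly truthy; the empty-string case is unreachable on Pre_.
def pvFinishA (d : PySem.Dict String String) (ap? : Option String) (taf : List String) :
    PySem.Dict String String :=
  match ap? with
  | some ap => if taf.isEmpty then d else d.insert ap (PySem.Str.join "\n" taf)
  | none => d

-- one iteration of A's for-loop over (taf_dict, current_airport, current_taf)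
def pvStepA (st : PySem.Dict String String × Option String × List String) (line : String) :
    PySem.Dict String String × Option String × List String :=
  if PySem.Str.startswith line "TAF" || PySem.Str.startswith line "TAF AMD" ||
      PySem.Str.startswith line "TAF COR" then
    let d := pvFinishA st.1 st.2.1 st.2.2
    let parts := PySem.Str.split₀ line
    -- parts[2] / parts[1]: IndexError (pyGet? = none) is excluded by Pre_
    let ap := if PySem.Str.startswith line "TAF AMD" || PySem.Str.startswith line "TAF COR" then
        (PySem.List.pyGet? parts 2).getD ""
      else
        (PySem.List.pyGet? parts 1).getD ""
    (d, some ap, [line])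
  else
    match st.2.1 with
    | some _ => (st.1, st.2.1, st.2.2 ++ [PySem.Str.strip line])
    | none => st

def parse_taf_data (taf_lines : List String) : List (String × String) :=
  (pvFinishA (List.foldl pvStepA (PySem.Dict.empty, none, []) taf_lines).1
    (List.foldl pvStepA (PySem.Dict.empty, none, []) taf_lines).2.1
    (List.foldl pvStepA (PySem.Dict.empty, none, []) taf_lines).2.2).items

-- ===== PORT B =====
-- 'while rest and not rest[0].startswith("TAF"): body.append(rest[0].strip()); rest = rest[1:]'
-- returns (stripped body, remaining lines starting at the next header)
def pvSplitBody : List String → List String × List String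
  | [] => ([], [])
  | l :: rest =>
    if PySem.Str.startswith l "TAF" then ([], l :: rest)
    else ((PySem.Str.strip l) :: (pvSplitBody rest).1, (pvSplitBody rest).2)

-- termination measure for pvBlocks (the port cites it in decreasing_by)
theorem pvSplitBody_len : ∀ ls : List String, (pvSplitBody ls).2.length ≤ ls.length := by
  intro ls
  induction ls with
  | nil => simp [pvSplitBody]
  | cons l rest ih =>
    by_cases h : PySem.Str.startswith l "TAF" = true
    · simp only [pvSplitBody, if_pos h, List.length_cons]
      exact Nat.le_refl _
    · simp only [pvSplitBody, if_neg h, List.length_cons]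
      exact Nat.le_succ_of_le ih

-- outer 'while lines:' of B: peel one header + body block, insert, continue on the rest
def pvBlocks : List String → PySem.Dict String String → PySem.Dict String String
  | [], d => d
  | header :: rest, d =>
    let parts := PySem.Str.split₀ header
    let key := if PySem.Str.startswith header "TAF AMD" ||
        PySem.Str.startswith header "TAF COR" then
        (PySem.List.pyGet? parts 2).getD ""
      else
        (PySem.List.pyGet? parts 1).getD ""
    pvBlocks (pvSplitBody rest).2
      (d.insert key (PySem.Str.join "\n" (header :: (pvSplitBody rest).1)))
  termination_by ls _ => ls.length
  decreasing_by exact Nat.lt_succ_of_le (pvSplitBody_len rest)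

-- 'while lines and not lines[0].startswith("TAF"): lines = lines[1:]'
def pvDropJunk : List String → List String
  | [] => []
  | l :: rest => if PySem.Str.startswith l "TAF" then l :: rest else pvDropJunk rest

def parse_taf_data_alt (taf_lines : List String) : List (String × String) :=
  (pvBlocks (pvDropJunk taf_lines) PySem.Dict.empty).items

-- ===== PRECONDITION & SPEC =====
-- Pre_ excludes exactly the inputs on which Python A raises IndexError: a line starting
-- with "TAF" whose split() has too few tokens for the parts[2]/parts[1] access.
def Pre_parse_taf_data (taf_lines : List String) : Prop :=
  ∀ line ∈ taf_lines, PySem.Str.startswith line "TAF" = true →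
    (if PySem.Str.startswith line "TAF AMD" || PySem.Str.startswith line "TAF COR" then 3
     else 2) ≤ (PySem.Str.split₀ line).length

instance (taf_lines : List String) : Decidable (Pre_parse_taf_data taf_lines) := by
  unfold Pre_parse_taf_data; infer_instance

def pvWitness_parse_taf_data : List String :=
  ["junk", "TAF VHHH 120300Z", "  TEMPO 1200  ", "TAF AMD X KJFK 10", "body"]

def Spec_parse_taf_data (taf_lines : List String) (out : List (String × String)) : Prop :=
  out = parse_taf_data_alt taf_lines
instance (taf_lines : List String) (out : List (String × String)) :
    Decidable (Spec_parse_taf_data taf_lines out) := by unfold Spec_parse_taf_data; infer_instance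

-- ===== CLAIM (what is proved, stated in full; the proofs are below) =====
def Claim_equal_parse_taf_data : Prop := ∀ (taf_lines : List String),
  Dom_parse_taf_data taf_lines → Pre_parse_taf_data taf_lines →
  Spec_parse_taf_data taf_lines (parse_taf_data taf_lines)

-- ===== LEMMAS AND PROOFS =====

-- the key expression shared textually by both Pythons (proof-side abbreviation)
def pvKeyOf (l : String) : String :=
  if PySem.Str.startswith l "TAF AMD" || PySem.Str.startswith l "TAF COR" then
    (PySem.List.pyGet? (PySem.Str.split₀ l) 2).getD ""
  else (PySem.List.pyGet? (PySem.Str.split₀ l) 1).getD ""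

theorem pvPrefix_mono (l p q : String) (hpq : p.toList <+: q.toList)
    (h : PySem.Str.startswith l q = true) : PySem.Str.startswith l p = true := by
  simp only [PySem.Str.startswith_eq] at *
  rw [PySem.Chars.startswith_iff] at *
  exact hpq.trans h

theorem pvHdr_simp (l : String) :
    (PySem.Str.startswith l "TAF" || PySem.Str.startswith l "TAF AMD" ||
      PySem.Str.startswith l "TAF COR") = PySem.Str.startswith l "TAF" := by
  cases h : PySem.Str.startswith l "TAF" with
  | true => simp only [h, Bool.true_or]
  | false =>
    have hA : ∀ q : String, "TAF".toList <+: q.toList → PySem.Str.startswith l q = false := by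
      intro q hq
      cases hq2 : PySem.Str.startswith l q with
      | false => rfl
      | true => rw [pvPrefix_mono l "TAF" q hq hq2] at h; exact h
    simp only [h, Bool.false_or, hA "TAF AMD" (by decide), hA "TAF COR" (by decide),
      Bool.or_self]

theorem pvFinishA_some (d : PySem.Dict String String) (ap : String) (taf : List String)
    (htaf : taf ≠ []) :
    pvFinishA d (some ap) taf = d.insert ap (PySem.Str.join "\n" taf) := by
  simp only [pvFinishA]
  rw [if_neg (by simpa [List.isEmpty_iff] using htaf)]

theorem pvStepA_hdr (d : PySem.Dict String String) (ap? : Option String) (taf : List String)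
    (l : String) (h : PySem.Str.startswith l "TAF" = true) :
    pvStepA (d, ap?, taf) l = (pvFinishA d ap? taf, some (pvKeyOf l), [l]) := by
  simp only [pvStepA, pvKeyOf]
  rw [pvHdr_simp l, if_pos h]

theorem pvStepA_nonhdr_some (d : PySem.Dict String String) (ap : String) (taf : List String)
    (l : String) (h : ¬ PySem.Str.startswith l "TAF" = true) :
    pvStepA (d, some ap, taf) l = (d, some ap, taf ++ [PySem.Str.strip l]) := by
  simp only [pvStepA]
  rw [pvHdr_simp l, if_neg h]

theorem pvStepA_nonhdr_none (d : PySem.Dict String String) (taf : List String)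
    (l : String) (h : ¬ PySem.Str.startswith l "TAF" = true) :
    pvStepA (d, none, taf) l = (d, none, taf) := by
  simp only [pvStepA]
  rw [pvHdr_simp l, if_neg h]

theorem pvSplitBody_hdr (l : String) (rest : List String)
    (h : PySem.Str.startswith l "TAF" = true) :
    pvSplitBody (l :: rest) = ([], l :: rest) := by
  simp only [pvSplitBody]
  rw [if_pos h]

theorem pvSplitBody_nonhdr (l : String) (rest : List String)
    (h : ¬ PySem.Str.startswith l "TAF" = true) :
    pvSplitBody (l :: rest) =
      (PySem.Str.strip l :: (pvSplitBody rest).1, (pvSplitBody rest).2) := by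
  simp only [pvSplitBody]
  rw [if_neg h]

theorem pvDropJunk_hdr (l : String) (rest : List String)
    (h : PySem.Str.startswith l "TAF" = true) :
    pvDropJunk (l :: rest) = l :: rest := by
  simp only [pvDropJunk]
  rw [if_pos h]

theorem pvDropJunk_nonhdr (l : String) (rest : List String)
    (h : ¬ PySem.Str.startswith l "TAF" = true) :
    pvDropJunk (l :: rest) = pvDropJunk rest := by
  simp only [pvDropJunk]
  rw [if_neg h]

theorem pvBlocks_cons (l : String) (rest : List String) (d : PySem.Dict String String) :
    pvBlocks (l :: rest) d =
      pvBlocks (pvSplitBody rest).2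
        (d.insert (pvKeyOf l) (PySem.Str.join "\n" (l :: (pvSplitBody rest).1))) := by
  simp only [pvBlocks, pvKeyOf]

theorem pvL1 : ∀ (lines : List String) (d : PySem.Dict String String) (ap : String)
    (taf : List String), taf ≠ [] →
    pvFinishA (List.foldl pvStepA (d, some ap, taf) lines).1
        (List.foldl pvStepA (d, some ap, taf) lines).2.1
        (List.foldl pvStepA (d, some ap, taf) lines).2.2 =
      pvBlocks (pvSplitBody lines).2
        (d.insert ap (PySem.Str.join "\n" (taf ++ (pvSplitBody lines).1))) := by
  intro lines
  induction lines with
  | nil =>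
    intro d ap taf htaf
    simp only [List.foldl_nil, pvSplitBody, pvBlocks, List.append_nil]
    exact pvFinishA_some d ap taf htaf
  | cons l rest ih =>
    intro d ap taf htaf
    by_cases h : PySem.Str.startswith l "TAF" = true
    · rw [List.foldl_cons, pvStepA_hdr d (some ap) taf l h, pvFinishA_some d ap taf htaf]
      rw [ih _ _ [l] (by simp)]
      simp only [pvSplitBody_hdr l rest h, pvBlocks_cons, List.singleton_append,
        List.append_nil]
    · rw [List.foldl_cons, pvStepA_nonhdr_some d ap taf l h]
      rw [ih _ _ _ (by simp)]
      simp only [pvSplitBody_nonhdr l rest h, List.append_assoc, List.singleton_append]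

theorem pvL0 : ∀ lines : List String,
    pvFinishA (List.foldl pvStepA (PySem.Dict.empty, none, []) lines).1
        (List.foldl pvStepA (PySem.Dict.empty, none, []) lines).2.1
        (List.foldl pvStepA (PySem.Dict.empty, none, []) lines).2.2 =
      pvBlocks (pvDropJunk lines) PySem.Dict.empty := by
  intro lines
  induction lines with
  | nil => simp only [List.foldl_nil, pvFinishA, pvDropJunk, pvBlocks]
  | cons l rest ih =>
    by_cases h : PySem.Str.startswith l "TAF" = true
    · rw [List.foldl_cons, pvStepA_hdr PySem.Dict.empty none [] l h]
      have : pvFinishA PySem.Dict.empty none [] = PySem.Dict.empty := rfl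
      rw [this, pvL1 rest _ _ [l] (by simp)]
      simp only [pvDropJunk_hdr l rest h, pvBlocks_cons, List.singleton_append,
        List.append_nil]
    · rw [List.foldl_cons, pvStepA_nonhdr_none PySem.Dict.empty [] l h, ih,
        pvDropJunk_nonhdr l rest h]

-- ===== VERDICT (by name: the statement is the Claim_ definition above) =====
theorem parse_taf_data_spec : Claim_equal_parse_taf_data := by
  intro taf_lines _ _
  show parse_taf_data taf_lines = parse_taf_data_alt taf_lines
  unfold parse_taf_data parse_taf_data_alt
  rw [pvL0 taf_lines]
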